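-- pv_equiv track=rewrite | github.com/leon-venir/mkits | mkits/qe.py | qe_input_lines_parser
-- ===== SOURCE A (Python) =====
-- def qe_input_lines_parser(lines:list):
--     """
--     &CONTROL
--     &SYSTEM
--     &ELECTRONS
--     &IONS
--     &CELL
--     ATOMIC_SPECIES
--     K_POINTS
--     CELL_PARAMETERS
--     ATOMIC_POSITIONS
--     """
--
--     lines_control = {
--         "CONTROL_beg": -1,
--         "CONTROL_end": -1,
--         "SYSTEM_beg": -1,
--         "SYSTEM_end": -1,
--         "ELECTRONS_beg": -1,
--         "ELECTRONS_end": -1,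
--         "IONS_beg": -1,
--         "IONS_end": -1,
--         "CELL_beg": -1,
--         "CELL_end": -1,
--         "ATOMIC_SPECIES_beg": -1,
--         "ATOMIC_SPECIES_end": -1,
--         "K_POINTS_beg": -1,
--         "K_POINTS_end": -1,
--         "CELL_PARAMETERS_beg": -1,
--         "CELL_PARAMETERS_end": -1,
--         "ATOMIC_POSITIONS_beg": -1,
--         "ATOMIC_POSITIONS_end": -1
--     }
--
--     for i in range(len(lines)):
--         if "&CONTROL" in lines[i]:
--             lines_control["CONTROL_beg"] = i
--             for j in range(i, len(lines)):
--                 if "/" in lines[j]: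
--                     lines_control["CONTROL_end"] = j
--                     break
--         elif "&SYSTEM" in lines[i]:
--             lines_control["SYSTEM_beg"] = i
--             for j in range(i, len(lines)):
--                 if "/" in lines[j]:
--                     lines_control["SYSTEM_end"] = j
--                     break
--         elif "&ELECTRONS" in lines[i]:
--             lines_control["ELECTRONS_beg"] = i
--             for j in range(i, len(lines)):
--                 if "/" in lines[j]:
--                     lines_control["ELECTRONS_end"] = j
--                     break
--         elif "&IONS" in lines[i]:
--             lines_control["IONS_beg"] = i
--             for j in range(i, len(lines)):
--                 if "/" in lines[j]:
--                     lines_control["IONS_end"] = j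
--                     break
--         elif "&CELL" in lines[i]:
--             lines_control["CELL_beg"] = i
--             for j in range(i, len(lines)):
--                 if "/" in lines[j]:
--                     lines_control["CELL_end"] = j
--                     break
--         elif "ATOMIC_SPECIES" in lines[i]:
--             lines_control["ATOMIC_SPECIES_beg"] = i
--             for j in range(i, len(lines)):
--                 if lines[j].split():
--                     pass
--                 else:
--                     lines_control["ATOMIC_SPECIES_end"] = j
--                     break
--         elif "K_POINTS" in lines[i]:
--             lines_control["K_POINTS_beg"] = i
--             for j in range(i, len(lines)):
--                 if lines[j].split():
--                     pass
--                 else: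
--                     lines_control["K_POINTS_end"] = j
--                     break
--         elif "CELL_PARAMETERS" in lines[i]:
--             lines_control["CELL_PARAMETERS_beg"] = i
--             for j in range(i, len(lines)):
--                 if lines[j].split():
--                     pass
--                 else:
--                     lines_control["CELL_PARAMETERS_end"] = j
--                     break
--         elif "ATOMIC_POSITIONS" in lines[i]:
--             lines_control["ATOMIC_POSITIONS_beg"] = i
--             for j in range(i, len(lines)):
--                 if lines[j].split():
--                     pass
--                 else:
--                     lines_control["ATOMIC_POSITIONS_end"] = j
--                     break
--     return lines_control
-- ===== SOURCE B (Python) =====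
-- _SECTIONS = [
--     ("&CONTROL", "CONTROL_beg", "CONTROL_end", True),
--     ("&SYSTEM", "SYSTEM_beg", "SYSTEM_end", True),
--     ("&ELECTRONS", "ELECTRONS_beg", "ELECTRONS_end", True),
--     ("&IONS", "IONS_beg", "IONS_end", True),
--     ("&CELL", "CELL_beg", "CELL_end", True),
--     ("ATOMIC_SPECIES", "ATOMIC_SPECIES_beg", "ATOMIC_SPECIES_end", False),
--     ("K_POINTS", "K_POINTS_beg", "K_POINTS_end", False),
--     ("CELL_PARAMETERS", "CELL_PARAMETERS_beg", "CELL_PARAMETERS_end", False),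
--     ("ATOMIC_POSITIONS", "ATOMIC_POSITIONS_beg", "ATOMIC_POSITIONS_end", False),
-- ]
--
--
-- def qe_input_lines_parser(lines: list):
--     n = len(lines)
--     # suffix arrays: next_slash[i] = first j >= i with "/" in lines[j] (-1 if none),
--     # next_blank[i] = first j >= i that is whitespace-only (-1 if none)
--     next_slash = [-1] * (n + 1)
--     next_blank = [-1] * (n + 1)
--     for i in range(n - 1, -1, -1):
--         next_slash[i] = i if "/" in lines[i] else next_slash[i + 1]
--         next_blank[i] = i if not lines[i].split() else next_blank[i + 1]
--     res = {}
--     for _, kb, ke, _ in _SECTIONS: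
--         res[kb] = -1
--         res[ke] = -1
--     for i, line in enumerate(lines):
--         for pat, kb, ke, is_namelist in _SECTIONS:
--             if pat in line:
--                 res[kb] = i
--                 j = next_slash[i] if is_namelist else next_blank[i]
--                 if j != -1:
--                     res[ke] = j
--                 break
--     return res
-- ===== Notes on version B (the rewrite author's own statement) =====
-- stated objective: alternative
-- what changed: Replaces A's per-header forward rescans (a fresh scan to the next '/' or blank line for each matched header) and its hard-coded 9-branch elif chain by two precomputed next-slash/next-blank suffix arrays filled in one backward pass, with the headers kept in a data table; asymptotically O(n) vs A's O(n^2) worst case, but not measurably faster on typical inputs.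
import Mathlib
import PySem

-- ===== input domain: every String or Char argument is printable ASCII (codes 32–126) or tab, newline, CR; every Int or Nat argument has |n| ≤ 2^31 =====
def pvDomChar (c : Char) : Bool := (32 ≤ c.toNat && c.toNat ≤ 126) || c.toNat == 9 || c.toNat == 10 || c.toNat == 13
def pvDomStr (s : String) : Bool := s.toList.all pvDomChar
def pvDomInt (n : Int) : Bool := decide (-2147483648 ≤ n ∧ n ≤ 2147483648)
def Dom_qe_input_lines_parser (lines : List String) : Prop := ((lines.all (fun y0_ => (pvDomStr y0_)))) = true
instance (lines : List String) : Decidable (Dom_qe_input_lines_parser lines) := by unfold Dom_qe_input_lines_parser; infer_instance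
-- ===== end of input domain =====

-- B replaces A's per-header forward rescans by two precomputed next-slash / next-blank suffix
-- arrays and a table-driven section classifier: one pass instead of nested scans.


-- ===== PORT A =====

-- A's initial dict literal (18 keys, all -1)
def qeDictA : PySem.Dict String Int := PySem.Dict.ofList
  [("CONTROL_beg", -1), ("CONTROL_end", -1), ("SYSTEM_beg", -1), ("SYSTEM_end", -1),
   ("ELECTRONS_beg", -1), ("ELECTRONS_end", -1), ("IONS_beg", -1), ("IONS_end", -1),
   ("CELL_beg", -1), ("CELL_end", -1), ("ATOMIC_SPECIES_beg", -1), ("ATOMIC_SPECIES_end", -1),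
   ("K_POINTS_beg", -1), ("K_POINTS_end", -1), ("CELL_PARAMETERS_beg", -1), ("CELL_PARAMETERS_end", -1),
   ("ATOMIC_POSITIONS_beg", -1), ("ATOMIC_POSITIONS_end", -1)]

-- A's inner loop  'for j in range(i, len(lines)): if "/" in lines[j]: d[key] = j; break'
def qeScanSlash (lines : List String) (key : String) (d : PySem.Dict String Int) :
    List Int → PySem.Dict String Int
  | [] => d
  | j :: rest =>
    if PySem.Str.isIn "/" (PySem.List.pyGetD lines j "") then d.insert key j
    else qeScanSlash lines key d rest

-- A's inner loop  'for j in range(i, len(lines)): if lines[j].split(): pass else: d[key] = j; break'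
-- (it breaks exactly on the first j whose split() is empty)
def qeScanBlank (lines : List String) (key : String) (d : PySem.Dict String Int) :
    List Int → PySem.Dict String Int
  | [] => d
  | j :: rest =>
    if (PySem.Str.split₀ (PySem.List.pyGetD lines j "")).isEmpty then d.insert key j
    else qeScanBlank lines key d rest

-- A's loop body: the 9-way elif chain over lines[i]
def qeStepA (lines : List String) (d : PySem.Dict String Int) (i : Int) : PySem.Dict String Int :=
  let n : Int := PySem.List.len lines
  let li := PySem.List.pyGetD lines i ""
  if PySem.Str.isIn "&CONTROL" li then
    qeScanSlash lines "CONTROL_end" (d.insert "CONTROL_beg" i) (PySem.List.pyRange i n)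
  else if PySem.Str.isIn "&SYSTEM" li then
    qeScanSlash lines "SYSTEM_end" (d.insert "SYSTEM_beg" i) (PySem.List.pyRange i n)
  else if PySem.Str.isIn "&ELECTRONS" li then
    qeScanSlash lines "ELECTRONS_end" (d.insert "ELECTRONS_beg" i) (PySem.List.pyRange i n)
  else if PySem.Str.isIn "&IONS" li then
    qeScanSlash lines "IONS_end" (d.insert "IONS_beg" i) (PySem.List.pyRange i n)
  else if PySem.Str.isIn "&CELL" li then
    qeScanSlash lines "CELL_end" (d.insert "CELL_beg" i) (PySem.List.pyRange i n)
  else if PySem.Str.isIn "ATOMIC_SPECIES" li then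
    qeScanBlank lines "ATOMIC_SPECIES_end" (d.insert "ATOMIC_SPECIES_beg" i) (PySem.List.pyRange i n)
  else if PySem.Str.isIn "K_POINTS" li then
    qeScanBlank lines "K_POINTS_end" (d.insert "K_POINTS_beg" i) (PySem.List.pyRange i n)
  else if PySem.Str.isIn "CELL_PARAMETERS" li then
    qeScanBlank lines "CELL_PARAMETERS_end" (d.insert "CELL_PARAMETERS_beg" i) (PySem.List.pyRange i n)
  else if PySem.Str.isIn "ATOMIC_POSITIONS" li then
    qeScanBlank lines "ATOMIC_POSITIONS_end" (d.insert "ATOMIC_POSITIONS_beg" i) (PySem.List.pyRange i n)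
  else d

def qe_input_lines_parser (lines : List String) : List (String × Int) :=
  ((PySem.List.pyRange 0 (PySem.List.len lines)).foldl (qeStepA lines) qeDictA).items

-- ===== PORT B =====

-- B's section table: (pattern, beg key, end key, is_namelist)
def qeSections : List (String × String × String × Bool) :=
  [("&CONTROL", "CONTROL_beg", "CONTROL_end", true),
   ("&SYSTEM", "SYSTEM_beg", "SYSTEM_end", true),
   ("&ELECTRONS", "ELECTRONS_beg", "ELECTRONS_end", true),
   ("&IONS", "IONS_beg", "IONS_end", true),
   ("&CELL", "CELL_beg", "CELL_end", true),
   ("ATOMIC_SPECIES", "ATOMIC_SPECIES_beg", "ATOMIC_SPECIES_end", false),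
   ("K_POINTS", "K_POINTS_beg", "K_POINTS_end", false),
   ("CELL_PARAMETERS", "CELL_PARAMETERS_beg", "CELL_PARAMETERS_end", false),
   ("ATOMIC_POSITIONS", "ATOMIC_POSITIONS_beg", "ATOMIC_POSITIONS_end", false)]

-- B's backward suffix-array fill, as structural recursion from the tail:
-- entry for absolute index i is i if p holds there, else the next entry (-1 when none).
def qeNext (p : String → Bool) : Int → List String → List Int
  | _, [] => []
  | i, l :: rest =>
    let tail := qeNext p (i + 1) rest
    (if p l then i else tail.headD (-1)) :: tail

-- B's init loop over the table
def qeDictB : PySem.Dict String Int :=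
  qeSections.foldl (fun d e => (d.insert e.2.1 (-1)).insert e.2.2.1 (-1)) PySem.Dict.empty

-- B's inner 'for pat, kb, ke, is_namelist in _SECTIONS: if pat in line: ...; break'
def qeClassify : List (String × String × String × Bool) → String →
    Option (String × String × String × Bool)
  | [], _ => none
  | e :: rest, line => if PySem.Str.isIn e.1 line then some e else qeClassify rest line

-- B's loop body: first matching table entry, O(1) end-index lookup
def qeStepB (ns nb : List Int) (d : PySem.Dict String Int) (il : Int × String) :
    PySem.Dict String Int :=
  match qeClassify qeSections il.2 with
  | none => d
  | some (_, kb, ke, isNl) =>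
    let d := d.insert kb il.1
    let j := PySem.List.pyGetD (if isNl then ns else nb) il.1 (-1)
    if j ≠ -1 then d.insert ke j else d

def qe_input_lines_parser_alt (lines : List String) : List (String × Int) :=
  let ns := qeNext (fun s => PySem.Str.isIn "/" s) 0 lines
  let nb := qeNext (fun s => (PySem.Str.split₀ s).isEmpty) 0 lines
  ((PySem.List.enumerate lines 0).foldl (qeStepB ns nb) qeDictB).items

-- ===== PRECONDITION & SPEC =====
def Spec_qe_input_lines_parser (lines : List String) (out : List (String × Int)) : Prop := out = qe_input_lines_parser_alt lines
instance (lines : List String) (out : List (String × Int)) : Decidable (Spec_qe_input_lines_parser lines out) := by unfold Spec_qe_input_lines_parser; infer_instance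

-- ===== CLAIM (what is proved, stated in full; the proofs are below) =====
def Claim_equal_qe_input_lines_parser : Prop := ∀ (lines : List String), Dom_qe_input_lines_parser lines → Spec_qe_input_lines_parser lines (qe_input_lines_parser lines)

-- ===== LEMMAS AND PROOFS =====

lemma qeDict_init_eq : qeDictA = qeDictB := by decide

-- B's suffix array read at k is the first index ≥ k (absolute offset b) satisfying p
lemma qeNext_getD (p : String → Bool) (lines : List String) :
    ∀ (b : Int) (k : Nat),
      (qeNext p b lines).getD k (-1) =
        match (lines.drop k).findIdx? p with
        | some t => b + k + t
        | none => -1 := by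
  induction lines with
  | nil => intro b k; simp [qeNext]
  | cons l rest ih =>
    intro b k
    cases k with
    | zero =>
      have hh : (qeNext p (b + 1) rest).headD (-1) = (qeNext p (b + 1) rest).getD 0 (-1) := by
        cases qeNext p (b + 1) rest <;> rfl
      have hih := ih (b + 1) 0
      rw [List.drop_zero] at hih
      simp only [qeNext, List.drop_zero, List.findIdx?_cons, List.getD_cons_zero]
      by_cases hp : p l
      · simp [hp]
      · simp only [hp, Bool.false_eq_true, if_false, hh, hih]
        cases rest.findIdx? p with
        | none => rfl
        | some t => simp only [Option.map_some]; push_cast; ring_nf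
    | succ k =>
      simp only [qeNext, List.drop_succ_cons, List.getD_cons_succ, ih (b + 1) k]
      cases (rest.drop k).findIdx? p with
      | none => rfl
      | some t => push_cast; ring_nf

-- A's slash rescan from i equals an insert decided by the first qualifying index ≥ i
lemma qeScanSlash_eq (lines : List String) (key : String) :
    ∀ (fuel : Nat) (i : Nat) (d : PySem.Dict String Int), lines.length - i = fuel →
      qeScanSlash lines key d (PySem.List.pyRange (i : Int) (lines.length : Int)) =
        match (lines.drop i).findIdx? (fun s => PySem.Str.isIn "/" s) with
        | some t => d.insert key ((i : Int) + t)
        | none => d := by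
  intro fuel
  induction fuel with
  | zero =>
    intro i d hf
    have hin : lines.length ≤ i := by omega
    rw [PySem.List.pyRange_one_eq_nil (by exact_mod_cast hin)]
    rw [List.drop_eq_nil_of_le hin]
    simp [qeScanSlash]
  | succ fuel ih =>
    intro i d hf
    have hi : i < lines.length := by omega
    rw [PySem.List.pyRange_one_cons (by exact_mod_cast hi)]
    rw [List.drop_eq_getElem_cons hi, List.findIdx?_cons]
    simp only [qeScanSlash]
    rw [PySem.List.pyGetD_natCast, List.getD_eq_getElem lines "" hi]
    by_cases hp : PySem.Str.isIn "/" lines[i]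
    · rw [if_pos hp, if_pos hp]; simp
    · have : ((i : Int) + 1) = ((i + 1 : Nat) : Int) := by push_cast; ring
      rw [this]
      simp only [hp, ih (i + 1) d (by omega)]
      cases (lines.drop (i + 1)).findIdx? (fun s => PySem.Str.isIn "/" s) with
      | none => simp
      | some t => simp; ring_nf

-- A's blank rescan from i, same statement for the blank-line predicate
lemma qeScanBlank_eq (lines : List String) (key : String) :
    ∀ (fuel : Nat) (i : Nat) (d : PySem.Dict String Int), lines.length - i = fuel →
      qeScanBlank lines key d (PySem.List.pyRange (i : Int) (lines.length : Int)) =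
        match (lines.drop i).findIdx? (fun s => (PySem.Str.split₀ s).isEmpty) with
        | some t => d.insert key ((i : Int) + t)
        | none => d := by
  intro fuel
  induction fuel with
  | zero =>
    intro i d hf
    have hin : lines.length ≤ i := by omega
    rw [PySem.List.pyRange_one_eq_nil (by exact_mod_cast hin)]
    rw [List.drop_eq_nil_of_le hin]
    simp [qeScanBlank]
  | succ fuel ih =>
    intro i d hf
    have hi : i < lines.length := by omega
    rw [PySem.List.pyRange_one_cons (by exact_mod_cast hi)]
    rw [List.drop_eq_getElem_cons hi, List.findIdx?_cons]
    simp only [qeScanBlank]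
    rw [PySem.List.pyGetD_natCast, List.getD_eq_getElem lines "" hi]
    by_cases hp : (PySem.Str.split₀ lines[i]).isEmpty
    · rw [if_pos hp, if_pos hp]; simp
    · have : ((i : Int) + 1) = ((i + 1 : Nat) : Int) := by push_cast; ring
      rw [this]
      simp only [hp, ih (i + 1) d (by omega)]
      cases (lines.drop (i + 1)).findIdx? (fun s => (PySem.Str.split₀ s).isEmpty) with
      | none => simp
      | some t => simp; ring_nf

-- the two loop bodies agree at every in-range index
lemma qeStep_eq (lines : List String) (i : Nat) (hi : i < lines.length)
    (d : PySem.Dict String Int) :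
    qeStepA lines d (i : Int) =
      qeStepB (qeNext (fun s => PySem.Str.isIn "/" s) 0 lines)
              (qeNext (fun s => (PySem.Str.split₀ s).isEmpty) 0 lines)
              d ((i : Int), lines[i]) := by
  have hget : PySem.List.pyGetD lines (i : Int) "" = lines[i] := by
    rw [PySem.List.pyGetD_natCast, List.getD_eq_getElem lines "" hi]
  unfold qeStepA qeStepB
  simp only [qeClassify, qeSections, hget, PySem.List.len_eq]
  split_ifs with h1 h2 h3 h4 h5 h6 h7 h8 h9 <;>
    simp only [] <;>
    first
    | rfl
    | (rw [qeScanSlash_eq lines _ (lines.length - i) i _ rfl]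
       simp only [reduceIte]
       rw [PySem.List.pyGetD_natCast, qeNext_getD]
       cases hfi : List.findIdx? (fun s => PySem.Str.isIn "/" s) (List.drop i lines) with
       | none => simp
       | some t => rw [if_pos (show (0 : Int) + ↑i + ↑t ≠ -1 by omega)]; simp)
    | (rw [qeScanBlank_eq lines _ (lines.length - i) i _ rfl]
       simp only [Bool.false_eq_true, reduceIte]
       rw [PySem.List.pyGetD_natCast, qeNext_getD]
       cases hfi : List.findIdx? (fun s => (PySem.Str.split₀ s).isEmpty) (List.drop i lines) with
       | none => simp
       | some t => rw [if_pos (show (0 : Int) + ↑i + ↑t ≠ -1 by omega)]; simp)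

-- the two folds agree from any start index
lemma qeFold_eq (lines : List String) :
    ∀ (fuel : Nat) (k : Nat) (d : PySem.Dict String Int), lines.length - k = fuel →
      (PySem.List.pyRange (k : Int) (lines.length : Int)).foldl (qeStepA lines) d =
        ((PySem.List.enumerate lines 0).drop k).foldl
          (qeStepB (qeNext (fun s => PySem.Str.isIn "/" s) 0 lines)
                   (qeNext (fun s => (PySem.Str.split₀ s).isEmpty) 0 lines)) d := by
  intro fuel
  induction fuel with
  | zero =>
    intro k d hf
    have hin : lines.length ≤ k := by omega
    rw [PySem.List.pyRange_one_eq_nil (by exact_mod_cast hin),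
        List.drop_eq_nil_of_le (by rw [PySem.List.length_enumerate]; exact hin)]
    rfl
  | succ fuel ih =>
    intro k d hf
    have hk : k < lines.length := by omega
    have hk' : k < (PySem.List.enumerate lines 0).length := by
      rw [PySem.List.length_enumerate]; exact hk
    rw [PySem.List.pyRange_one_cons (by exact_mod_cast hk),
        List.drop_eq_getElem_cons hk', PySem.List.getElem_enumerate]
    simp only [List.foldl_cons, zero_add]
    rw [qeStep_eq lines k hk d]
    have : ((k : Int) + 1) = ((k + 1 : Nat) : Int) := by push_cast; ring
    rw [this, ih (k + 1) _ (by omega)]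

-- ===== VERDICT (by name: the statement is the Claim_ definition above) =====
theorem qe_input_lines_parser_spec : Claim_equal_qe_input_lines_parser := by
  intro lines _
  unfold Spec_qe_input_lines_parser qe_input_lines_parser qe_input_lines_parser_alt
  rw [qeDict_init_eq, PySem.List.len_eq]
  rw [show ((0 : Int)) = ((0 : Nat) : Int) from rfl, qeFold_eq lines lines.length 0 qeDictB (by omega)]
  rfl
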